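-- pv_equiv track=rewrite | github.com/dev-sameer/soslab | backend/kubesos_analyzer.py | is_kubesos_archive
-- ===== SOURCE A (Python) =====
-- from typing import Dict, List, Any, Optional, Tuple
--
-- def is_kubesos_archive(extracted_files: List[Dict]) -> bool:
--     """Detect if this is a KubeSOS archive based on file structure"""
--     filenames = [f['relative_path'] for f in extracted_files]
--
--     # Core KubeSOS indicators
--     kubesos_indicators = [
--         'kubeSOS.info',
--         'kubectl-check',
--         'describe_pods',
--         'get_pods',
--         'events'
--     ]
--
--     # Also check for container log naming pattern
--     container_log_pattern = False
--     for filename in filenames: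
--         # KubeSOS logs follow pattern: podname_containername.log
--         if '_' in filename and filename.endswith('.log'):
--             parts = filename.split('_')
--             if len(parts) >= 2:
--                 container_log_pattern = True
--                 break
--
--     matches = sum(1 for indicator in kubesos_indicators
--                  if any(indicator in f for f in filenames))
--
--     # Need at least 3 indicators OR container log pattern + 2 indicators
--     return matches >= 3 or (container_log_pattern and matches >= 2)
-- ===== SOURCE B (Python) =====
-- def is_kubesos_archive(extracted_files):
--     """Single pass over files: collect the set of matched indicators and the log-pattern flag."""
--     kubesos_indicators = [
--         'kubeSOS.info',
--         'kubectl-check',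
--         'describe_pods',
--         'get_pods',
--         'events'
--     ]
--     matched = set()
--     container_log_pattern = False
--     for f in extracted_files:
--         name = f['relative_path']
--         if '_' in name and name.endswith('.log') and len(name.split('_')) >= 2:
--             container_log_pattern = True
--         for indicator in kubesos_indicators:
--             if indicator in name:
--                 matched.add(indicator)
--     matches = len(matched)
--     return matches >= 3 or (container_log_pattern and matches >= 2)
-- ===== Notes on version B (the rewrite author's own statement) =====
-- stated objective: idiomatic
-- what changed: One pass over the files maintaining a set of matched indicators and the log-pattern flag, instead of building a filenames list, a break-loop for the pattern, and a separate indicators-by-filenames double scan.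
import Mathlib
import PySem

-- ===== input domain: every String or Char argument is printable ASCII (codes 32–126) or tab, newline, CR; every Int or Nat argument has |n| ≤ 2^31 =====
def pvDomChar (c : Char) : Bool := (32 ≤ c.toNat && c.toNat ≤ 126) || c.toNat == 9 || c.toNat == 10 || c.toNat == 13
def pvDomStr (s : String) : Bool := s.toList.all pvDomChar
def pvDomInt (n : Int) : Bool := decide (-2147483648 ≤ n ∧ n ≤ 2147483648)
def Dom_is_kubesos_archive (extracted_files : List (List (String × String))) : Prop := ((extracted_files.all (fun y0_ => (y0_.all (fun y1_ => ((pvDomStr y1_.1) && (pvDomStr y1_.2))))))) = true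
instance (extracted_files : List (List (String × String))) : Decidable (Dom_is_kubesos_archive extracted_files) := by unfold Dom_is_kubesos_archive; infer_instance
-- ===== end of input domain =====

-- B is a single pass over the files maintaining a set of matched indicators and the log-pattern
-- flag (idiomatic decomposition); A builds a filenames list, runs a break-loop, then a double scan.

-- ===== PORT A =====
def kubesosIndicators : List String :=
  ["kubeSOS.info", "kubectl-check", "describe_pods", "get_pods", "events"]

-- the 'for filename in filenames: … break' loop of A
def findLogPatternA : List String → Bool
  | [] => false
  | fn :: rest =>
    if PySem.Str.isIn "_" fn && PySem.Str.endswith fn ".log" then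
      if 2 ≤ ((PySem.Str.split? fn "_").getD []).length then true
      else findLogPatternA rest
    else findLogPatternA rest

def is_kubesos_archive (extracted_files : List (List (String × String))) : Bool :=
  -- f['relative_path']: under Pre_ every dict has the key, so getD is exact
  let filenames := extracted_files.map (fun f => (PySem.Dict.mk f).getD "relative_path" "")
  let container_log_pattern := findLogPatternA filenames
  let matchCnt : Int := kubesosIndicators.foldl
    (fun acc indicator => if filenames.any (fun f => PySem.Str.isIn indicator f) then acc + 1 else acc) 0
  decide (3 ≤ matchCnt) || (container_log_pattern && decide (2 ≤ matchCnt))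

-- ===== PORT B =====
-- the body of B's single loop: update (matched set, log-pattern flag) with one file
def stepB (st : PySem.Set String × Bool) (f : List (String × String)) :
    PySem.Set String × Bool :=
  let name := (PySem.Dict.mk f).getD "relative_path" ""
  let flag := if PySem.Str.isIn "_" name && PySem.Str.endswith name ".log"
                 && 2 ≤ ((PySem.Str.split? name "_").getD []).length then true else st.2
  let matched := kubesosIndicators.foldl
    (fun s indicator => if PySem.Str.isIn indicator name then PySem.Set.add s indicator else s) st.1
  (matched, flag)

def is_kubesos_archive_alt (extracted_files : List (List (String × String))) : Bool :=
  let st := extracted_files.foldl stepB (PySem.Set.empty, false)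
  let matchCnt := PySem.Set.len st.1
  decide (3 ≤ matchCnt) || (st.2 && decide (2 ≤ matchCnt))

-- ===== PRECONDITION & SPEC =====
-- Pre_ excludes exactly the inputs where some dict lacks the 'relative_path' key: there A
-- raises KeyError (and B raises too).
def Pre_is_kubesos_archive (extracted_files : List (List (String × String))) : Prop :=
  ∀ f ∈ extracted_files, (PySem.Dict.mk f).contains "relative_path" = true
instance (extracted_files : List (List (String × String))) : Decidable (Pre_is_kubesos_archive extracted_files) := by unfold Pre_is_kubesos_archive; infer_instance

def pvWitness_is_kubesos_archive : (List (List (String × String))) :=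
  [[("relative_path", "get_pods.txt")], [("relative_path", "pod_app.log")]]

def Spec_is_kubesos_archive (extracted_files : List (List (String × String))) (out : Bool) : Prop := out = is_kubesos_archive_alt extracted_files
instance (extracted_files : List (List (String × String))) (out : Bool) : Decidable (Spec_is_kubesos_archive extracted_files out) := by unfold Spec_is_kubesos_archive; infer_instance

-- ===== CLAIM (what is proved, stated in full; the proofs are below) =====
def Claim_equal_is_kubesos_archive : Prop := ∀ (extracted_files : List (List (String × String))), Dom_is_kubesos_archive extracted_files → Pre_is_kubesos_archive extracted_files → Spec_is_kubesos_archive extracted_files (is_kubesos_archive extracted_files)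

-- ===== LEMMAS AND PROOFS =====

-- the common log-pattern predicate
def predLog (fn : String) : Bool :=
  PySem.Str.isIn "_" fn && PySem.Str.endswith fn ".log"
    && decide (2 ≤ ((PySem.Str.split? fn "_").getD []).length)

theorem findLogPatternA_eq_any (fns : List String) :
    findLogPatternA fns = fns.any predLog := by
  induction fns with
  | nil => rfl
  | cons fn rest ih =>
    cases hb1 : PySem.Str.isIn "_" fn <;> cases hb2 : PySem.Str.endswith fn ".log" <;>
      simp_all [findLogPatternA, predLog] <;> split_ifs <;> simp_all

-- B's fold splits into two independent folds
def innerAdd (s : PySem.Set String) (name : String) : PySem.Set String :=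
  kubesosIndicators.foldl
    (fun s indicator => if PySem.Str.isIn indicator name then PySem.Set.add s indicator else s) s

theorem foldB_fst (files : List (List (String × String))) (s : PySem.Set String) (b : Bool) :
    (files.foldl stepB (s, b)).1 =
      (files.map (fun f => (PySem.Dict.mk f).getD "relative_path" "")).foldl innerAdd s := by
  induction files generalizing s b with
  | nil => rfl
  | cons f rest ih => simp [stepB, innerAdd, ih]

theorem foldB_snd (files : List (List (String × String))) (s : PySem.Set String) (b : Bool) :
    (files.foldl stepB (s, b)).2 =
      (b || (files.map (fun f => (PySem.Dict.mk f).getD "relative_path" "")).any predLog) := by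
  induction files generalizing s b with
  | nil => simp
  | cons f rest ih =>
    simp [stepB, predLog, ih, Bool.or_left_comm, Bool.or_assoc]

-- membership in a conditional-add fold over any indicator list
theorem mem_condAdd_fold (inds : List String) (q : String → Bool) (s : PySem.Set String)
    (x : String) :
    x ∈ inds.foldl (fun s i => if q i then PySem.Set.add s i else s) s ↔
      x ∈ s ∨ (x ∈ inds ∧ q x = true) := by
  induction inds generalizing s with
  | nil => simp
  | cons i rest ih =>
    simp only [List.foldl_cons, ih, List.mem_cons]
    by_cases h : q i = true
    · simp only [h, if_pos]
      rw [PySem.Set.mem_add]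
      constructor
      · rintro (⟨hs | hx⟩ | hr)
        · exact Or.inl hs
        · exact Or.inr ⟨Or.inl hx, hx ▸ h⟩
        · exact Or.inr ⟨Or.inr hr.1, hr.2⟩
      · rintro (hs | ⟨hi | hr, hq⟩)
        · exact Or.inl (Or.inl hs)
        · exact Or.inl (Or.inr hi)
        · exact Or.inr ⟨hr, hq⟩
    · simp only [h, if_neg Bool.false_ne_true]
      constructor
      · rintro (hs | hr)
        · exact Or.inl hs
        · exact Or.inr ⟨Or.inr hr.1, hr.2⟩
      · rintro (hs | ⟨hi | hr, hq⟩)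
        · exact Or.inl hs
        · exact absurd (hi ▸ hq) h
        · exact Or.inr ⟨hr, hq⟩

theorem nodup_condAdd_fold (inds : List String) (q : String → Bool) (s : PySem.Set String)
    (hs : s.Nodup) :
    (inds.foldl (fun s i => if q i then PySem.Set.add s i else s) s).Nodup := by
  induction inds generalizing s with
  | nil => exact hs
  | cons i rest ih =>
    simp only [List.foldl_cons]
    by_cases h : q i = true
    · simp only [h, if_pos]
      exact ih _ (PySem.Set.nodup_add _ _ hs)
    · simp only [h, if_neg Bool.false_ne_true]
      exact ih _ hs

theorem mem_innerAdd_foldl (fns : List String) (s : PySem.Set String) (x : String) :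
    x ∈ fns.foldl innerAdd s ↔
      x ∈ s ∨ (x ∈ kubesosIndicators ∧ fns.any (fun f => PySem.Str.isIn x f) = true) := by
  induction fns generalizing s with
  | nil => simp
  | cons fn rest ih =>
    simp only [List.foldl_cons, ih, innerAdd, mem_condAdd_fold, List.any_cons]
    constructor
    · rintro ((hs | ⟨hk, hq⟩) | ⟨hk, ha⟩)
      · exact Or.inl hs
      · refine Or.inr ⟨hk, ?_⟩; simp_all
      · refine Or.inr ⟨hk, ?_⟩; simp_all
    · rintro (hs | ⟨hk, ha⟩)
      · exact Or.inl (Or.inl hs)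
      · simp only [Bool.or_eq_true] at ha
        rcases ha with h | h
        · exact Or.inl (Or.inr ⟨hk, h⟩)
        · exact Or.inr ⟨hk, by simpa using h⟩

theorem nodup_innerAdd_foldl (fns : List String) (s : PySem.Set String) (hs : s.Nodup) :
    (fns.foldl innerAdd s).Nodup := by
  induction fns generalizing s with
  | nil => exact hs
  | cons fn rest ih => exact ih _ (nodup_condAdd_fold _ _ _ hs)

-- a counting fold is the length of the filter
theorem foldl_count_filter (inds : List String) (p : String → Bool) (a : Int) :
    inds.foldl (fun acc i => if p i then acc + 1 else acc) a =
      a + ((inds.filter p).length : Int) := by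
  induction inds generalizing a with
  | nil => simp
  | cons i rest ih =>
    by_cases h : p i = true
    · simp [h, ih]; ring
    · simp [h, ih]

-- the matched set has the same length as the filtered indicator list
theorem len_matched (fns : List String) :
    (fns.foldl innerAdd PySem.Set.empty).length =
      (kubesosIndicators.filter (fun ind => fns.any (fun f => PySem.Str.isIn ind f))).length := by
  apply List.Perm.length_eq
  rw [List.perm_ext_iff_of_nodup
    (nodup_innerAdd_foldl fns PySem.Set.empty (by simp [PySem.Set.empty]))
    (List.Nodup.filter _ (by decide))]
  intro x
  rw [mem_innerAdd_foldl, List.mem_filter]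
  simp [PySem.Set.empty]

theorem is_kubesos_archive_eq (extracted_files : List (List (String × String))) :
    is_kubesos_archive extracted_files = is_kubesos_archive_alt extracted_files := by
  unfold is_kubesos_archive is_kubesos_archive_alt
  simp only [findLogPatternA_eq_any, foldl_count_filter,
    foldB_fst extracted_files PySem.Set.empty false,
    foldB_snd extracted_files PySem.Set.empty false,
    PySem.Set.len, len_matched, Bool.false_or, zero_add]

-- ===== VERDICT (by name: the statement is the Claim_ definition above) =====
theorem is_kubesos_archive_spec : Claim_equal_is_kubesos_archive := by
  intro extracted_files _ _
  unfold Spec_is_kubesos_archive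
  exact is_kubesos_archive_eq extracted_files
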